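-- pv_equiv track=rewrite | github.com/seokjeongeum/SQLBot | third_party/nl2qgm/analyze/statistic.py | has_orderby
-- ===== SOURCE A (Python) =====
-- def has_orderby(sql):
--     sql_s = sql.split(' ')
--     b_cnt = 0
--     for idx, tok in enumerate(sql_s):
--         if '(' in tok:
--             b_cnt += tok.count('(')
--         if ')' in tok:
--             b_cnt -= tok.count(')')
--         if b_cnt == 0 and tok == 'ORDER' and sql_s[idx+1] == 'BY':
--             return True
--     return False
-- ===== SOURCE B (Python) =====
-- def has_orderby(sql):
--     toks = sql.split(' ')
--     return any(
--         toks[i] == 'ORDER'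
--         and toks[i + 1] == 'BY'
--         and ' '.join(toks[:i + 1]).count('(') == ' '.join(toks[:i + 1]).count(')')
--         for i in range(len(toks) - 1)
--     )
-- ===== Notes on version B (the rewrite author's own statement) =====
-- stated objective: alternative
-- what changed: A is a single stateful scan carrying a running parenthesis counter with guarded updates and early return; B keeps no running state at all: it enumerates candidate positions where the adjacent tokens are 'ORDER','BY' and, only for those candidates, decides top-levelness by recounting '(' and ')' in the rejoined prefix string, as a declarative any() over indices.
-- outside the precondition, e.g. on has_orderby('SELECT ORDER'): A raises IndexError, B returns False
import Mathlib
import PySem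

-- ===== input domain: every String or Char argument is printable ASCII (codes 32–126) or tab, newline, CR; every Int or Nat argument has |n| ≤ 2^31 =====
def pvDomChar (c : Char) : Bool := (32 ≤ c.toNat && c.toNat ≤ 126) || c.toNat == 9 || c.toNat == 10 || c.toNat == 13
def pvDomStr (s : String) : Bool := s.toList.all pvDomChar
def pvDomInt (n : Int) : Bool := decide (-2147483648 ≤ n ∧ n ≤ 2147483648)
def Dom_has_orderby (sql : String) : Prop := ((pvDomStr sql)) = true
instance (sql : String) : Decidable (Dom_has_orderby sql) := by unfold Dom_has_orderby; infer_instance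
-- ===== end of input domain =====

-- B replaces A's stateful running-counter scan with a stateless candidate search: it enumerates
-- adjacent 'ORDER','BY' token pairs and recounts '(' vs ')' in the rejoined prefix string for each
-- candidate. Objective: alternative (no running state; same result).

-- sql.split(' ')  (shared tokenizer helper)
def pvToks (sql : String) : List String :=
  (PySem.Chars.splitOn sql.toList " ".toList).map String.ofList

-- ===== PORT A =====
-- one token per step; `rest.head?` is sql_s[idx+1]: `none` is Python's IndexError (outside
-- Pre_has_orderby, where this port returns false)
def pvGoA : List String → Int → Bool
  | [], _ => false
  | tok :: rest, b_cnt =>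
    let b1 := if PySem.Str.isIn "(" tok then b_cnt + (PySem.Str.count tok "(" : Int) else b_cnt
    let b2 := if PySem.Str.isIn ")" tok then b1 - (PySem.Str.count tok ")" : Int) else b1
    if b2 == 0 && tok == "ORDER" then
      match rest.head? with
      | none => false  -- Python: IndexError (excluded by Pre_has_orderby)
      | some nxt => if nxt == "BY" then true else pvGoA rest b2
    else pvGoA rest b2

def has_orderby (sql : String) : Bool := pvGoA (pvToks sql) 0

-- ===== PORT B =====
-- range(len(toks) - 1) over Nat; toks[i] / toks[i+1] as getD (exact: i + 1 < len);
-- toks[:i+1] is List.take (i+1) (exact: nonnegative upper bound)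
def has_orderby_alt (sql : String) : Bool :=
  let toks := pvToks sql
  (List.range (toks.length - 1)).any fun i =>
    toks.getD i "" == "ORDER" && toks.getD (i + 1) "" == "BY" &&
      (PySem.Str.count (PySem.Str.join " " (toks.take (i + 1))) "("
        == PySem.Str.count (PySem.Str.join " " (toks.take (i + 1))) ")")

-- ===== PRECONDITION & SPEC =====
-- Pre_ excludes strings whose last space-token is 'ORDER' with zero overall parenthesis balance:
-- there A as a rule raises IndexError (sql_s[idx+1] past the end); the rare such strings where an
-- earlier top-level 'ORDER BY' makes A return True before reaching the end are conservatively
-- excluded with them.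
def pvBal (t : String) : Int := (PySem.Str.count t "(" : Int) - (PySem.Str.count t ")" : Int)

def Pre_has_orderby (sql : String) : Prop :=
  ¬ ((pvToks sql).getLast? = some "ORDER" ∧ ((pvToks sql).map pvBal).sum = 0)
instance (sql : String) : Decidable (Pre_has_orderby sql) := by unfold Pre_has_orderby; infer_instance

def pvWitness_has_orderby : String := "SELECT a FROM t ORDER BY b"

def Spec_has_orderby (sql : String) (out : Bool) : Prop := out = has_orderby_alt sql
instance (sql : String) (out : Bool) : Decidable (Spec_has_orderby sql out) := by unfold Spec_has_orderby; infer_instance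

-- ===== CLAIM (what is proved, stated in full; the proofs are below) =====
def Claim_equal_has_orderby : Prop := ∀ (sql : String), Dom_has_orderby sql → Pre_has_orderby sql → Spec_has_orderby sql (has_orderby sql)
-- ===== LEMMAS AND PROOFS =====

-- a substring that does not occur is counted 0 times (unrolls PySem.Chars.count.go)
lemma pv_go_not_infix (sub : List Char) :
    ∀ (fuel : Nat) (l : List Char) (acc : Nat),
      ¬ sub <:+: l → PySem.Chars.count.go sub fuel l acc = acc := by
  intro fuel
  induction fuel with
  | zero => intro l acc _; simp [PySem.Chars.count.go]
  | succ n ih =>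
    intro l acc h
    cases l with
    | nil => simp [PySem.Chars.count.go]
    | cons c t =>
      have hni : ¬ sub <+: (c :: t) := fun hp => h hp.isInfix
      rw [PySem.Chars.count.go,
        if_neg (fun hb => hni (List.isPrefixOf_iff_prefix.mp hb))]
      exact ih t acc (fun hx => h (hx.trans (List.suffix_cons c t).isInfix))

lemma pv_count_eq_zero (t sub : String) (hsub : sub.toList ≠ [])
    (h : PySem.Str.isIn sub t = false) : PySem.Str.count t sub = 0 := by
  rw [PySem.Str.count_eq]
  rw [PySem.Str.isIn_eq, PySem.Chars.isIn_eq_false_iff] at h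
  rw [PySem.Chars.count]
  simp only [List.isEmpty_eq_false_iff.mpr hsub, Bool.false_eq_true, if_false]
  exact pv_go_not_infix _ _ _ _ h

-- A's guarded counter updates equal the unconditional per-token balance
lemma pv_step_eq (tok : String) (b : Int) :
    (if PySem.Str.isIn ")" tok then
       (if PySem.Str.isIn "(" tok then b + (PySem.Str.count tok "(" : Int) else b)
         - (PySem.Str.count tok ")" : Int)
     else (if PySem.Str.isIn "(" tok then b + (PySem.Str.count tok "(" : Int) else b))
    = b + pvBal tok := by
  unfold pvBal
  split_ifs with hq hp hp
  · ring
  · rw [pv_count_eq_zero tok "(" (by decide) (by simpa using hp)]; push_cast; ring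
  · rw [pv_count_eq_zero tok ")" (by decide) (by simpa using hq)]; push_cast; ring
  · rw [pv_count_eq_zero tok "(" (by decide) (by simpa using hp),
        pv_count_eq_zero tok ")" (by decide) (by simpa using hq)]
    push_cast; ring

-- unfolding equation for A's loop body, with the counter update normalised by pv_step_eq
lemma pvGoA_cons (tok : String) (rest : List String) (b : Int) :
    pvGoA (tok :: rest) b =
      if (b + pvBal tok) == 0 && tok == "ORDER" then
        (match rest.head? with
         | none => false
         | some nxt => if nxt == "BY" then true else pvGoA rest (b + pvBal tok))
      else pvGoA rest (b + pvBal tok) := by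
  simp only [pvGoA]
  rw [pv_step_eq]

-- counting a single character: PySem.Chars.count l [c] is List.count
lemma pv_go_single (c : Char) :
    ∀ (l : List Char) (fuel acc : Nat), l.length ≤ fuel →
      PySem.Chars.count.go [c] fuel l acc = acc + l.count c := by
  intro l
  induction l with
  | nil => intro fuel acc _; cases fuel <;> simp [PySem.Chars.count.go]
  | cons h t ih =>
    intro fuel acc hf
    cases fuel with
    | zero => simp at hf
    | succ f =>
      rw [PySem.Chars.count.go]
      by_cases hc : c = h
      · subst hc
        rw [if_pos (by simp [List.isPrefixOf])]
        simp only [List.length_cons, List.length_nil, Nat.zero_add, List.drop_succ_cons,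
          List.drop_zero]
        rw [ih f (acc + 1) (by simpa using hf)]
        simp only [List.count_cons, BEq.rfl, if_pos]
        omega
      · rw [if_neg (by simp [List.isPrefixOf, hc])]
        rw [ih f acc (by simpa using hf)]
        simp [Ne.symm hc]

lemma pv_count_single (l : List Char) (c : Char) :
    PySem.Chars.count l [c] = l.count c := by
  rw [PySem.Chars.count]
  simp only [List.isEmpty_cons, Bool.false_eq_true, if_false]
  simpa using pv_go_single c l l.length 0 le_rfl

-- counting a non-separator character through ' '.join
lemma pv_count_intercalate (c : Char) (hc : c ≠ ' ') :
    ∀ (l : List (List Char)), (List.intercalate [' '] l).count c = (l.map (·.count c)).sum := by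
  intro l
  induction l with
  | nil => simp [List.intercalate]
  | cons a t ih =>
    cases t with
    | nil => simp [List.intercalate]
    | cons b t' =>
      have he : List.intercalate [' '] (a :: b :: t')
          = a ++ ' ' :: List.intercalate [' '] (b :: t') := by
        simp [List.intercalate, List.intersperse]
      rw [he]
      simp only [List.count_append, List.count_cons, List.map_cons, List.sum_cons]
      rw [ih]
      have hne : (' ' == c) = false := by simp [Ne.symm hc]
      simp only [hne, Bool.false_eq_true, if_false, List.map_cons, List.sum_cons]
      omega

lemma pv_join_count (l : List String) (sub : String) (c : Char) (hsub : sub.toList = [c])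
    (hc : c ≠ ' ') :
    PySem.Str.count (PySem.Str.join " " l) sub
      = ((l.map (fun t => PySem.Str.count t sub)).sum) := by
  rw [PySem.Str.count_eq, PySem.Str.toList_join, hsub]
  show PySem.Chars.count (List.intercalate " ".toList (l.map String.toList)) [c] = _
  rw [pv_count_single]
  have hsp : " ".toList = [' '] := rfl
  rw [hsp, pv_count_intercalate c hc]
  congr 1
  rw [List.map_map]
  congr 1
  funext t
  simp [PySem.Str.count_eq, hsub, pv_count_single]

lemma pv_sum_bal (l : List String) :
    (l.map pvBal).sum
      = ((l.map (fun t => PySem.Str.count t "(")).sum : Int)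
        - ((l.map (fun t => PySem.Str.count t ")")).sum : Int) := by
  induction l with
  | nil => simp
  | cons a t ih =>
    simp only [List.map_cons, List.sum_cons, ih, pvBal]
    push_cast
    ring

-- B's per-candidate prefix recount decides exactly `balance = 0`
lemma pv_joinBal (l : List String) :
    (PySem.Str.count (PySem.Str.join " " l) "("
       == PySem.Str.count (PySem.Str.join " " l) ")") = ((l.map pvBal).sum == 0) := by
  have h1 : PySem.Str.count (PySem.Str.join " " l) "("
      = (l.map (fun t => PySem.Str.count t "(")).sum := pv_join_count l "(" '(' rfl (by decide)
  have h2 : PySem.Str.count (PySem.Str.join " " l) ")"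
      = (l.map (fun t => PySem.Str.count t ")")).sum := pv_join_count l ")" ')' rfl (by decide)
  rw [h1, h2, Bool.eq_iff_iff]
  simp only [beq_iff_eq, pv_sum_bal]
  omega

-- A's scan returns true iff some adjacent pair 'ORDER','BY' sits at prefix balance -b
lemma pv_goA_exists (toks : List String) :
    ∀ b : Int, pvGoA toks b = true ↔
      ∃ i, i + 1 < toks.length ∧ toks.getD i "" = "ORDER" ∧ toks.getD (i + 1) "" = "BY" ∧
        b + ((toks.take (i + 1)).map pvBal).sum = 0 := by
  induction toks with
  | nil => intro b; simp [pvGoA]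
  | cons t r ih =>
    intro b
    rw [pvGoA_cons]
    have hshift : (∃ i', i' + 1 < r.length ∧ r.getD i' "" = "ORDER" ∧ r.getD (i' + 1) "" = "BY" ∧
        (b + pvBal t) + ((r.take (i' + 1)).map pvBal).sum = 0)
        ↔ (∃ i, 0 < i ∧ i + 1 < (t :: r).length ∧ (t :: r).getD i "" = "ORDER" ∧
            (t :: r).getD (i + 1) "" = "BY" ∧
            b + (((t :: r).take (i + 1)).map pvBal).sum = 0) := by
      constructor
      · rintro ⟨i', h1, h2, h3, h4⟩
        refine ⟨i' + 1, Nat.succ_pos _, by simpa using Nat.succ_lt_succ h1, by simpa using h2,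
          by simpa using h3, ?_⟩
        simp only [List.take_succ_cons, List.map_cons, List.sum_cons]
        omega
      · rintro ⟨i, hpos, h1, h2, h3, h4⟩
        obtain ⟨i', rfl⟩ := Nat.exists_eq_add_of_lt hpos
        simp only [Nat.zero_add] at *
        refine ⟨i', by simpa using Nat.lt_of_succ_lt_succ h1, by simpa using h2,
          by simpa using h3, ?_⟩
        simp only [List.take_succ_cons, List.map_cons, List.sum_cons] at h4
        omega
    by_cases hcond : (b + pvBal t) = 0 ∧ t = "ORDER"
    · obtain ⟨hb0, ht⟩ := hcond
      subst ht
      rw [if_pos (by simp [hb0])]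
      cases r with
      | nil => simp
      | cons x r' =>
        simp only [List.head?_cons]
        by_cases hx : x = "BY"
        · rw [if_pos (by simp [hx])]
          constructor
          · intro _
            exact ⟨0, by simp, by simp, by simp [hx], by simpa using hb0⟩
          · intro _; rfl
        · rw [if_neg (by simp [hx])]
          rw [ih (b + pvBal "ORDER")]
          rw [hshift]
          constructor
          · rintro ⟨i, hpos, rest⟩; exact ⟨i, rest⟩
          · rintro ⟨i, h1, h2, h3, h4⟩
            refine ⟨i, ?_, h1, h2, h3, h4⟩
            rcases Nat.eq_zero_or_pos i with hz | hp
            · subst hz; simp at h3; exact absurd h3 hx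
            · exact hp
    · rw [if_neg (by
        simp only [Bool.and_eq_true, beq_iff_eq]
        intro ⟨ha, hb⟩
        exact hcond ⟨ha, hb⟩)]
      rw [ih (b + pvBal t)]
      rw [hshift]
      constructor
      · rintro ⟨i, hpos, rest⟩; exact ⟨i, rest⟩
      · rintro ⟨i, h1, h2, h3, h4⟩
        refine ⟨i, ?_, h1, h2, h3, h4⟩
        rcases Nat.eq_zero_or_pos i with hz | hp
        · subst hz
          exfalso
          apply hcond
          simp only [List.getD_cons_zero] at h2
          constructor
          · simp only [List.take_succ_cons, List.take_zero, List.map_cons, List.map_nil,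
              List.sum_cons, List.sum_nil, add_zero] at h4
            omega
          · exact h2
        · exact hp

-- B's any over candidate indices is the same existential
lemma pv_altB_exists (toks : List String) :
    ((List.range (toks.length - 1)).any fun i =>
      toks.getD i "" == "ORDER" && toks.getD (i + 1) "" == "BY" &&
        (PySem.Str.count (PySem.Str.join " " (toks.take (i + 1))) "("
          == PySem.Str.count (PySem.Str.join " " (toks.take (i + 1))) ")")) = true ↔
    ∃ i, i + 1 < toks.length ∧ toks.getD i "" = "ORDER" ∧ toks.getD (i + 1) "" = "BY" ∧
      (0 : Int) + ((toks.take (i + 1)).map pvBal).sum = 0 := by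
  rw [List.any_eq_true]
  constructor
  · rintro ⟨i, hi, hcond⟩
    rw [List.mem_range] at hi
    rw [pv_joinBal] at hcond
    simp only [Bool.and_eq_true, beq_iff_eq] at hcond
    exact ⟨i, by omega, hcond.1.1, hcond.1.2, by omega⟩
  · rintro ⟨i, h1, h2, h3, h4⟩
    refine ⟨i, List.mem_range.mpr (by omega), ?_⟩
    rw [pv_joinBal]
    simp only [Bool.and_eq_true, beq_iff_eq]
    exact ⟨⟨h2, h3⟩, by omega⟩

-- ===== VERDICT (by name: the statement is the Claim_ definition above) =====
theorem has_orderby_spec : Claim_equal_has_orderby := by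
  intro sql _ _
  unfold Spec_has_orderby has_orderby has_orderby_alt
  rw [Bool.eq_iff_iff]
  rw [pv_goA_exists (pvToks sql) 0, pv_altB_exists (pvToks sql)]
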